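-- pv_equiv track=rewrite | github.com/kabhi99/System-Design | format_txt_to_md.py | find_border_tail
-- ===== SOURCE A (Python) =====
-- def find_border_tail(line):
--     """Scan from right to find where the nested border tail starts.
--
--     Border tail = the rightmost sequence of border chars (| or +)
--     each separated by 1-4 spaces.  E.g. '|  |  |' or '+  |' or '|'.
--     Returns the start position, or -1 if none found.
--     """
--     i = len(line) - 1
--     while i >= 0 and line[i] == ' ':
--         i -= 1
--     if i < 0 or line[i] not in '|+':
--         return -1
--     last_border = i
--     i -= 1
--     while i >= 0:
--         spaces = 0
--         while i >= 0 and line[i] == ' ':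
--             spaces += 1
--             i -= 1
--         if 1 <= spaces <= 4 and i >= 0 and line[i] in '|+':
--             last_border = i
--             i -= 1
--         else:
--             break
--     return last_border
-- ===== SOURCE B (Python) =====
-- def find_border_tail(line):
--     """Single left-to-right pass maintaining the start of the current valid
--     border chain and the index of the last border reachable through spaces."""
--     chain_start = -1
--     last = -1
--     for i, c in enumerate(line):
--         if c in '|+':
--             if not (last >= 0 and 1 <= i - last - 1 <= 4):
--                 chain_start = i
--             last = i
--         elif c != ' ':
--             chain_start = -1
--             last = -1
--     return chain_start if last >= 0 else -1
-- ===== Notes on version B (the rewrite author's own statement) =====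
-- stated objective: alternative
-- what changed: Replaces A's right-to-left strip-then-chain-walk (three nested while loops) with a single left-to-right pass maintaining the start of the current valid border chain and the index of the last border still reachable through spaces.
import Mathlib
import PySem

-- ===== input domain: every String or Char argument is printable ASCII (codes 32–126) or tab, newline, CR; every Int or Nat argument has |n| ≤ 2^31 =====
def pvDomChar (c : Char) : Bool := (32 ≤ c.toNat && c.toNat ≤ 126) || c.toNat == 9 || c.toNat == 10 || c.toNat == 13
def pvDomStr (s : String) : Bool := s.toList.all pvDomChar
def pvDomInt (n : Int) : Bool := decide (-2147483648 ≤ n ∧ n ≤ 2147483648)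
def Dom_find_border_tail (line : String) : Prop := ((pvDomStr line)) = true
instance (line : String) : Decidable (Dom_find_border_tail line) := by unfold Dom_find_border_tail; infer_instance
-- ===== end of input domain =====

-- B replaces A's right-to-left peel-then-chain loops by one left-to-right pass
-- maintaining (chain start, last reachable border); objective: alternative algorithm.

-- ===== PORT A =====
-- `while i >= 0 and line[i] == ' ': i -= 1`, with k = i + 1 (the default char is never read: k ≤ length at every call)
def stripSp (cs : List Char) : Nat → Nat
  | 0 => 0
  | k+1 => if cs.getD k 'x' = ' ' then stripSp cs k else k+1

-- inner `while i >= 0 and line[i] == ' ': spaces += 1; i -= 1`; returns (spaces, k) with k = i + 1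
def countSp (cs : List Char) : Nat → Nat × Nat
  | 0 => (0, 0)
  | k+1 => if cs.getD k 'x' = ' ' then
             let p := countSp cs k; (p.1 + 1, p.2)
           else (0, k+1)

theorem countSp_snd_le (cs : List Char) (k : Nat) : (countSp cs k).2 ≤ k := by
  induction k with
  | zero => simp [countSp]
  | succ k ih => simp only [countSp]; split; · simp; omega
                 · simp

-- outer `while i >= 0:` loop of A, with k = i + 1, carrying last_border
def loopA (cs : List Char) : Nat → Nat → Nat
  | 0, last => last
  | k+1, last =>
      let p := countSp cs (k+1)
      if 1 ≤ p.1 ∧ p.1 ≤ 4 ∧ 0 < p.2 ∧ (cs.getD (p.2 - 1) 'x' = '|' ∨ cs.getD (p.2 - 1) 'x' = '+')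
      then loopA cs (p.2 - 1) (p.2 - 1)
      else last
  decreasing_by
    have := countSp_snd_le cs (k+1); omega

def find_border_tail (line : String) : Int :=
  let cs := line.toList
  let k0 := stripSp cs cs.length
  if k0 = 0 then -1
  else if ¬ (cs.getD (k0-1) 'x' = '|' ∨ cs.getD (k0-1) 'x' = '+') then -1
  else ((loopA cs (k0-1) (k0-1) : Nat) : Int)

-- ===== PORT B =====
-- one step of the for-loop body, state = (chain_start, last)
def bStep (st : Int × Int) (i : Nat) (c : Char) : Int × Int :=
  if c = '|' ∨ c = '+' then
    (if ¬ (0 ≤ st.2 ∧ 1 ≤ (i:Int) - st.2 - 1 ∧ (i:Int) - st.2 - 1 ≤ 4) then (i:Int) else st.1,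
     (i:Int))
  else if c = ' ' then st
  else (-1, -1)

-- `for i, c in enumerate(line)` over the remaining suffix, i = current index
def bGo (cs : List Char) (i : Nat) (st : Int × Int) : Int × Int :=
  match cs with
  | [] => st
  | c :: r => bGo r (i+1) (bStep st i c)

def find_border_tail_alt (line : String) : Int :=
  let st := bGo line.toList 0 (-1, -1)
  if st.2 ≥ 0 then st.1 else -1

-- ===== PRECONDITION & SPEC =====
def Spec_find_border_tail (line : String) (out : Int) : Prop := out = find_border_tail_alt line
instance (line : String) (out : Int) : Decidable (Spec_find_border_tail line out) := by unfold Spec_find_border_tail; infer_instance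

-- ===== CLAIM (what is proved, stated in full; the proofs are below) =====
def Claim_equal_find_border_tail : Prop := ∀ (line : String), Dom_find_border_tail line → Spec_find_border_tail line (find_border_tail line)

-- ===== LEMMAS AND PROOFS =====

-- A's answer and A's "last border with only spaces after it", as total functions of the char list
def startOf (cs : List Char) : Int :=
  if 0 < stripSp cs cs.length ∧
      (cs.getD (stripSp cs cs.length - 1) 'x' = '|' ∨ cs.getD (stripSp cs cs.length - 1) 'x' = '+')
  then ((loopA cs (stripSp cs cs.length - 1) (stripSp cs cs.length - 1) : Nat) : Int)
  else -1

def lastOf (cs : List Char) : Int :=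
  if 0 < stripSp cs cs.length ∧
      (cs.getD (stripSp cs cs.length - 1) 'x' = '|' ∨ cs.getD (stripSp cs cs.length - 1) 'x' = '+')
  then ((stripSp cs cs.length - 1 : Nat) : Int)
  else -1

theorem stripSp_le (cs : List Char) (k : Nat) : stripSp cs k ≤ k := by
  induction k with
  | zero => simp [stripSp]
  | succ k ih => simp only [stripSp]; split <;> omega

theorem stripSp_append (cs ds : List Char) (k : Nat) (h : k ≤ cs.length) :
    stripSp (cs ++ ds) k = stripSp cs k := by
  induction k with
  | zero => rfl
  | succ k ih =>
      have hk : k < cs.length := by omega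
      simp only [stripSp, List.getD_append _ _ _ _ hk]
      split
      · exact ih (by omega)
      · rfl

theorem countSp_eq (cs : List Char) (k : Nat) :
    countSp cs k = (k - stripSp cs k, stripSp cs k) := by
  induction k with
  | zero => rfl
  | succ k ih =>
      simp only [countSp, stripSp]
      split
      · have := stripSp_le cs k
        simp [ih]; omega
      · simp

theorem loopA_append (cs ds : List Char) (k last : Nat) (h : k ≤ cs.length) :
    loopA (cs ++ ds) k last = loopA cs k last := by
  induction k using Nat.strong_induction_on generalizing last with
  | _ k ih =>
    match k with
    | 0 => rw [loopA, loopA]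
    | k+1 =>
      have hle := countSp_snd_le cs (k+1)
      have hst := stripSp_le cs (k+1)
      have hcs : countSp (cs ++ ds) (k+1) = countSp cs (k+1) := by
        rw [countSp_eq, countSp_eq, stripSp_append cs ds (k+1) h]
      rw [loopA, loopA]
      simp only [hcs]
      by_cases hz : 0 < (countSp cs (k+1)).2
      · have hlt : (countSp cs (k+1)).2 - 1 < cs.length := by omega
        rw [List.getD_append _ _ _ _ hlt]
        split
        · rename_i hc
          have hs1 : 1 ≤ (countSp cs (k+1)).1 := hc.1
          have : (countSp cs (k+1)).2 ≤ k := by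
            rw [countSp_eq] at hs1 ⊢
            simp at hs1 ⊢; omega
          exact ih ((countSp cs (k+1)).2 - 1) (by omega) _ (by omega)
        · rfl
      · have hz' : (countSp cs (k+1)).2 = 0 := by omega
        simp [hz']

theorem bGo_append (cs : List Char) (c : Char) (i : Nat) (st : Int × Int) :
    bGo (cs ++ [c]) i st = bStep (bGo cs i st) (i + cs.length) c := by
  induction cs generalizing i st with
  | nil => simp [bGo]
  | cons d r ih => simp [bGo, ih]; ring_nf

theorem getD_append_last (cs : List Char) (c : Char) :
    (cs ++ [c]).getD cs.length 'x' = c := by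
  simp

theorem strip_space (cs : List Char) :
    stripSp (cs ++ [' ']) (cs.length + 1) = stripSp cs cs.length := by
  rw [stripSp, getD_append_last, if_pos rfl]
  exact stripSp_append cs [' '] cs.length (le_refl _)

theorem strip_nonspace (cs : List Char) (c : Char) (h : c ≠ ' ') :
    stripSp (cs ++ [c]) (cs.length + 1) = cs.length + 1 := by
  rw [stripSp, getD_append_last, if_neg h]

theorem lastOf_space (cs : List Char) : lastOf (cs ++ [' ']) = lastOf cs := by
  unfold lastOf
  have hk0 := stripSp_le cs cs.length
  simp only [List.length_append, List.length_cons, List.length_nil, Nat.zero_add, strip_space]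
  by_cases hz : 0 < stripSp cs cs.length
  · rw [List.getD_append _ _ _ _ (by omega : stripSp cs cs.length - 1 < cs.length)]
  · simp [Nat.not_lt.mp hz |> Nat.le_zero.mp]

theorem startOf_space (cs : List Char) : startOf (cs ++ [' ']) = startOf cs := by
  unfold startOf
  have hk0 := stripSp_le cs cs.length
  simp only [List.length_append, List.length_cons, List.length_nil, Nat.zero_add, strip_space]
  by_cases hz : 0 < stripSp cs cs.length
  · rw [List.getD_append _ _ _ _ (by omega : stripSp cs cs.length - 1 < cs.length),
        loopA_append cs [' '] _ _ (by omega)]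
  · simp [Nat.not_lt.mp hz |> Nat.le_zero.mp]

theorem lastOf_other (cs : List Char) (c : Char) (hsp : c ≠ ' ')
    (hbd : ¬ (c = '|' ∨ c = '+')) : lastOf (cs ++ [c]) = -1 := by
  unfold lastOf
  simp only [List.length_append, List.length_cons, List.length_nil, Nat.zero_add,
    strip_nonspace cs c hsp, Nat.add_sub_cancel, getD_append_last]
  rw [if_neg (by tauto)]

theorem startOf_other (cs : List Char) (c : Char) (hsp : c ≠ ' ')
    (hbd : ¬ (c = '|' ∨ c = '+')) : startOf (cs ++ [c]) = -1 := by
  unfold startOf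
  simp only [List.length_append, List.length_cons, List.length_nil, Nat.zero_add,
    strip_nonspace cs c hsp, Nat.add_sub_cancel, getD_append_last]
  rw [if_neg (by tauto)]

theorem lastOf_bord (cs : List Char) (c : Char) (hbd : c = '|' ∨ c = '+') :
    lastOf (cs ++ [c]) = (cs.length : Int) := by
  have hsp : c ≠ ' ' := by rcases hbd with h | h <;> subst h <;> decide
  unfold lastOf
  simp only [List.length_append, List.length_cons, List.length_nil, Nat.zero_add,
    strip_nonspace cs c hsp, Nat.add_sub_cancel, getD_append_last]
  rw [if_pos ⟨by omega, hbd⟩]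

theorem startOf_bord (cs : List Char) (c : Char) (hbd : c = '|' ∨ c = '+') :
    startOf (cs ++ [c]) =
      if ¬ (0 ≤ lastOf cs ∧ 1 ≤ (cs.length : Int) - lastOf cs - 1 ∧
            (cs.length : Int) - lastOf cs - 1 ≤ 4)
      then (cs.length : Int) else startOf cs := by
  have hsp : c ≠ ' ' := by rcases hbd with h | h <;> subst h <;> decide
  have hk0 := stripSp_le cs cs.length
  unfold startOf
  simp only [List.length_append, List.length_cons, List.length_nil, Nat.zero_add,
    strip_nonspace cs c hsp, Nat.add_sub_cancel, getD_append_last]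
  rw [if_pos ⟨by omega, hbd⟩]
  rcases Nat.eq_zero_or_pos cs.length with hn0 | hn0
  · -- n = 0 : the loop body is not entered, the chain starts at 0
    have hcs : cs = [] := List.length_eq_zero_iff.mp hn0
    subst hcs
    simp only [List.length_nil] at *
    rw [loopA]
    simp [lastOf, stripSp]
  · obtain ⟨m, hm⟩ := Nat.exists_eq_succ_of_ne_zero (by omega : cs.length ≠ 0)
    rw [hm, loopA, ← hm]
    have hcnt : countSp (cs ++ [c]) (m + 1) = (cs.length - stripSp cs cs.length, stripSp cs cs.length) := by
      rw [countSp_eq, stripSp_append cs [c] (m+1) (by omega), hm]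
    simp only [hcnt]
    by_cases hz : 0 < stripSp cs cs.length
    · have hlt : stripSp cs cs.length - 1 < cs.length := by omega
      rw [List.getD_append _ _ _ _ hlt]
      by_cases hb : cs.getD (stripSp cs cs.length - 1) 'x' = '|' ∨ cs.getD (stripSp cs cs.length - 1) 'x' = '+'
      · have hlast : lastOf cs = ((stripSp cs cs.length - 1 : Nat) : Int) := by
          unfold lastOf; rw [if_pos ⟨hz, hb⟩]
        by_cases hgap : 1 ≤ cs.length - stripSp cs cs.length ∧ cs.length - stripSp cs cs.length ≤ 4
        · rw [if_pos ⟨hgap.1, hgap.2, hz, hb⟩, loopA_append cs [c] _ _ (by omega)]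
          rw [if_neg (by rw [hlast]; omega), if_pos ⟨hz, hb⟩]
        · rw [if_neg (by tauto), if_pos (by rw [hlast]; omega)]
      · have hlast : lastOf cs = -1 := by unfold lastOf; rw [if_neg (by tauto)]
        rw [if_neg (by tauto), if_pos (by rw [hlast]; omega)]
    · have hlast : lastOf cs = -1 := by unfold lastOf; rw [if_neg (by omega)]
      rw [if_neg (by omega), if_pos (by rw [hlast]; omega)]

-- the loop invariant: B's state after a prefix is (A's answer on it, A's rightmost reachable border)
theorem bGo_inv (cs : List Char) : bGo cs 0 (-1, -1) = (startOf cs, lastOf cs) := by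
  induction cs using List.reverseRecOn with
  | nil => simp [bGo, startOf, lastOf, stripSp]
  | append_singleton cs c ih =>
    rw [bGo_append, ih, Nat.zero_add]
    by_cases hbd : c = '|' ∨ c = '+'
    · unfold bStep
      rw [if_pos hbd, lastOf_bord cs c hbd, startOf_bord cs c hbd]
    · by_cases hsp : c = ' '
      · subst hsp
        unfold bStep
        rw [if_neg hbd, if_pos rfl, lastOf_space, startOf_space]
      · unfold bStep
        rw [if_neg hbd, if_neg hsp, lastOf_other cs c hsp hbd, startOf_other cs c hsp hbd]

theorem find_eq_startOf (line : String) : find_border_tail line = startOf line.toList := by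
  unfold find_border_tail startOf
  by_cases hz : stripSp line.toList line.toList.length = 0
  · rw [if_pos hz, if_neg (by rintro ⟨h1, -⟩; omega)]
  · by_cases hb : line.toList.getD (stripSp line.toList line.toList.length - 1) 'x' = '|' ∨
        line.toList.getD (stripSp line.toList line.toList.length - 1) 'x' = '+'
    · rw [if_neg hz, if_neg (not_not_intro hb), if_pos ⟨Nat.pos_of_ne_zero hz, hb⟩]
    · rw [if_neg hz, if_pos hb, if_neg (fun h => hb h.2)]

theorem startOf_neg (cs : List Char) (h : ¬ lastOf cs ≥ 0) : startOf cs = -1 := by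
  unfold startOf lastOf at *
  split at h
  · omega
  · rw [if_neg (by assumption)]

-- ===== VERDICT (by name: the statement is the Claim_ definition above) =====
theorem find_border_tail_spec : Claim_equal_find_border_tail := by
  intro line _
  unfold Spec_find_border_tail find_border_tail_alt
  rw [bGo_inv, find_eq_startOf]
  by_cases h : lastOf line.toList ≥ 0
  · rw [if_pos h]
  · rw [if_neg h, startOf_neg _ h]
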